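-- pv_equiv track=rewrite | github.com/12357-314/revdep | revdep/rdep_chain.py | _filter_input_lines
-- ===== SOURCE A (Python) =====
-- def _filter_input_lines(input_lines):
--     start_token = "pulled in by:"
--     end_token = ">>>"
--     start_flag = False
--     end_flag = False
--     for line in input_lines:
--         if not start_flag: start_flag = line.endswith(start_token)
--         if start_flag: end_flag = line.startswith(end_token)
--         if end_flag: break
--         yield(line)
-- ===== SOURCE B (Python) =====
-- def _filter_input_lines(input_lines):
--     lines = list(input_lines)
--     starts = [i for i, line in enumerate(lines) if line.endswith("pulled in by:")]
--     if not starts: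
--         return lines
--     i = starts[0]
--     ends = [j for j, line in enumerate(lines) if j >= i and line.startswith(">>>")]
--     cut = ends[0] if ends else len(lines)
--     return lines[:cut]
-- ===== Notes on version B (the rewrite author's own statement) =====
-- stated objective: alternative
-- what changed: Replaces the stateful flag-driven generator loop with an index computation: find the first line ending with the start token, then the first line at or after it starting with the end token, and return one slice lines[:cut] - no flags, no yield loop.
import Mathlib
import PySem

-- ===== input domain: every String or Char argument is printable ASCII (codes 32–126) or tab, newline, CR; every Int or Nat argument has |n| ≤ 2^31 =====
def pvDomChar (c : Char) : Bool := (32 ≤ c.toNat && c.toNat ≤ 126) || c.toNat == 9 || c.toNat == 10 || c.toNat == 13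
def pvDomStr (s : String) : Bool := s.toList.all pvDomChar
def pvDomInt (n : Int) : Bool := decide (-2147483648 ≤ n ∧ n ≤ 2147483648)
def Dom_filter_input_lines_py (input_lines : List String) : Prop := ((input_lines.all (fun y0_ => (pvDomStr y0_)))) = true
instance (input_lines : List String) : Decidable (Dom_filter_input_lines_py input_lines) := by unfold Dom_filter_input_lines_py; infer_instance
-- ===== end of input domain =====

-- B replaces A's flag-driven generator loop by an index computation (first start index,
-- first end index at or after it) and a single slice lines[:cut]: a different decomposition,
-- same O(n) cost. (A is a generator; equivalence is about the list of yielded lines.)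

-- ===== PORT A =====
-- A's for-loop with the two flags; `break` = stop recursing. start_flag is threaded;
-- end_flag is recomputed each iteration exactly as in A (it is never carried over a round
-- in which it is false, and a true value stops the loop immediately).
def pvAloop : Bool → List String → List String
  | _, [] => []
  | start_flag, line :: rest =>
    let start_flag := if start_flag then true else PySem.Str.endswith line "pulled in by:"
    let end_flag := if start_flag then PySem.Str.startswith line ">>>" else false
    if end_flag then [] else line :: pvAloop start_flag rest

def filter_input_lines_py (input_lines : List String) : List String :=
  pvAloop false input_lines

-- ===== PORT B =====
-- literal port of Source B: the two index comprehensions via enumerate/filter/map,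
-- `ends[0] if ends else len(lines)` via headD, and lines[:cut] via slice (cut ≥ 0).
def filter_input_lines_py_alt (input_lines : List String) : List String :=
  let starts := ((PySem.List.enumerate input_lines 0).filter
      (fun p => PySem.Str.endswith p.2 "pulled in by:")).map (·.1)
  match starts with
  | [] => input_lines
  | i :: _ =>
    let ends := ((PySem.List.enumerate input_lines 0).filter
        (fun p => decide (i ≤ p.1) && PySem.Str.startswith p.2 ">>>")).map (·.1)
    let cut := ends.headD (input_lines.length : Int)
    PySem.List.slice input_lines none (some cut)

-- ===== PRECONDITION & SPEC =====
def Spec_filter_input_lines_py (input_lines : List String) (out : List String) : Prop := out = filter_input_lines_py_alt input_lines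
instance (input_lines : List String) (out : List String) : Decidable (Spec_filter_input_lines_py input_lines out) := by unfold Spec_filter_input_lines_py; infer_instance

-- ===== CLAIM (what is proved, stated in full; the proofs are below) =====
def Claim_equal_filter_input_lines_py : Prop := ∀ (input_lines : List String), Dom_filter_input_lines_py input_lines → Spec_filter_input_lines_py input_lines (filter_input_lines_py input_lines)

-- ===== LEMMAS AND PROOFS =====

-- shifting the enumeration start by one shifts every surviving index by one
theorem pv_enum_shift (P : Int × String → Bool) (s : Int) (xs : List String) :
    ((PySem.List.enumerate xs (s+1)).filter P).map (·.1)
    = (((PySem.List.enumerate xs s).filter (fun p => P (p.1 + 1, p.2))).map (·.1)).map (· + 1) := by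
  induction xs generalizing s with
  | nil => simp [PySem.List.enumerate_nil]
  | cons l ls ih =>
    rw [PySem.List.enumerate_cons, PySem.List.enumerate_cons]
    by_cases h : P (s + 1, l) = true <;> simp [h, ih (s + 1)]

-- every index produced by an enumerate-filter-map starting at s is ≥ s
theorem pv_enum_fst_nonneg (P : Int × String → Bool) (s : Int) (xs : List String) :
    ∀ i ∈ ((PySem.List.enumerate xs s).filter P).map (·.1), s ≤ i := by
  intro i hi
  simp only [List.mem_map, List.mem_filter] at hi
  obtain ⟨p, ⟨hp, _⟩, rfl⟩ := hi
  obtain ⟨k, _, rfl⟩ := (PySem.List.mem_enumerate_iff xs s p).1 hp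
  omega

-- the index lists of Source B, named for the proofs
def pvStarts (ls : List String) : List Int :=
  ((PySem.List.enumerate ls 0).filter (fun p => PySem.Str.endswith p.2 "pulled in by:")).map (·.1)

def pvEnds (i : Int) (ls : List String) : List Int :=
  ((PySem.List.enumerate ls 0).filter (fun p => decide (i ≤ p.1) && PySem.Str.startswith p.2 ">>>")).map (·.1)

def pvSIdx (ls : List String) : List Int :=
  ((PySem.List.enumerate ls 0).filter (fun p => PySem.Str.startswith p.2 ">>>")).map (·.1)

theorem pv_alt_def (ls : List String) :
    filter_input_lines_py_alt ls = match pvStarts ls with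
      | [] => ls
      | i :: _ => PySem.List.slice ls none (some ((pvEnds i ls).headD (ls.length : Int))) := rfl

theorem pv_headD_nonneg (xs : List Int) (d : Int) (h : ∀ x ∈ xs, 0 ≤ x) (hd : 0 ≤ d) :
    0 ≤ xs.headD d := by
  cases xs with
  | nil => simpa
  | cons x xs => exact h x (by simp)

theorem pv_headD_map_add_one (xs : List Int) (d : Int) :
    (xs.map (· + 1)).headD (d + 1) = xs.headD d + 1 := by cases xs <;> simp

theorem pv_slice_cons (l : String) (ls : List String) (c : Int) (hc : 0 ≤ c) :
    PySem.List.slice (l :: ls) none (some (c + 1)) = l :: PySem.List.slice ls none (some c) := by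
  rw [PySem.List.slice_to (l :: ls) (by omega : (0:Int) ≤ c + 1), PySem.List.slice_to ls hc]
  have h1 : (c + 1).toNat = c.toNat + 1 := by omega
  rw [h1, List.take_succ_cons]

theorem pv_slice_zero (ls : List String) : PySem.List.slice ls none (some 0) = [] := by
  rw [PySem.List.slice_to ls (le_refl (0:Int))]
  simp

theorem pv_sidx_nonneg (ls : List String) : ∀ x ∈ pvSIdx ls, 0 ≤ x :=
  pv_enum_fst_nonneg _ 0 ls

theorem pv_starts_nonneg (ls : List String) : ∀ x ∈ pvStarts ls, 0 ≤ x :=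
  pv_enum_fst_nonneg _ 0 ls

theorem pv_ends_nonneg (i : Int) (ls : List String) : ∀ x ∈ pvEnds i ls, 0 ≤ x :=
  pv_enum_fst_nonneg _ 0 ls

theorem pv_sidx_cons (l : String) (ls : List String) :
    pvSIdx (l :: ls) = (if PySem.Str.startswith l ">>>" then [(0 : Int)] else []) ++ (pvSIdx ls).map (· + 1) := by
  unfold pvSIdx
  rw [PySem.List.enumerate_cons, List.filter_cons]
  by_cases h : PySem.Str.startswith l ">>>"
  · rw [if_pos (show PySem.Str.startswith ((0 : Int), l).2 ">>>" = true from h), if_pos h,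
      List.map_cons, pv_enum_shift (fun p => PySem.Str.startswith p.2 ">>>") 0 ls]
    rfl
  · rw [if_neg (show ¬ PySem.Str.startswith ((0 : Int), l).2 ">>>" = true from h), if_neg h,
      pv_enum_shift (fun p => PySem.Str.startswith p.2 ">>>") 0 ls]
    rfl

theorem pv_starts_cons (l : String) (ls : List String) :
    pvStarts (l :: ls) = (if PySem.Str.endswith l "pulled in by:" then [(0 : Int)] else []) ++ (pvStarts ls).map (· + 1) := by
  unfold pvStarts
  rw [PySem.List.enumerate_cons, List.filter_cons]
  by_cases h : PySem.Str.endswith l "pulled in by:"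
  · rw [if_pos (show PySem.Str.endswith ((0 : Int), l).2 "pulled in by:" = true from h), if_pos h,
      List.map_cons, pv_enum_shift (fun p => PySem.Str.endswith p.2 "pulled in by:") 0 ls]
    rfl
  · rw [if_neg (show ¬ PySem.Str.endswith ((0 : Int), l).2 "pulled in by:" = true from h), if_neg h,
      pv_enum_shift (fun p => PySem.Str.endswith p.2 "pulled in by:") 0 ls]
    rfl

theorem pv_ends_cons (i : Int) (hi : 0 ≤ i) (l : String) (ls : List String) :
    pvEnds (i + 1) (l :: ls) = (pvEnds i ls).map (· + 1) := by
  unfold pvEnds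
  rw [PySem.List.enumerate_cons, List.filter_cons]
  have h0 : ¬ ((decide ((i + 1 : Int) ≤ ((0 : Int), l).1) && PySem.Str.startswith ((0 : Int), l).2 ">>>") = true) := by
    have : decide ((i + 1 : Int) ≤ 0) = false := by
      rw [decide_eq_false_iff_not]; omega
    show ¬ ((decide ((i + 1 : Int) ≤ 0) && PySem.Str.startswith l ">>>") = true)
    rw [this, Bool.false_and]
    exact Bool.false_ne_true
  rw [if_neg h0, pv_enum_shift (fun p => decide (i + 1 ≤ p.1) && PySem.Str.startswith p.2 ">>>") 0 ls]
  have hcg : ((PySem.List.enumerate ls 0).filter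
        (fun p => decide (i + 1 ≤ ((p.1 + 1, p.2) : Int × String).1) && PySem.Str.startswith ((p.1 + 1, p.2) : Int × String).2 ">>>"))
      = ((PySem.List.enumerate ls 0).filter (fun p => decide (i ≤ p.1) && PySem.Str.startswith p.2 ">>>")) := by
    apply List.filter_congr
    intro p _
    show (decide (i + 1 ≤ p.1 + 1) && PySem.Str.startswith p.2 ">>>") = _
    have : decide ((i + 1 : Int) ≤ p.1 + 1) = decide (i ≤ p.1) := by
      rw [decide_eq_decide]; omega
    rw [this]
  rw [show (((PySem.List.enumerate ls 0).filter
        (fun p => decide (i + 1 ≤ (p.1 + 1, p.2).1) && PySem.Str.startswith (p.1 + 1, p.2).2 ">>>")))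
      = ((PySem.List.enumerate ls 0).filter (fun p => decide (i ≤ p.1) && PySem.Str.startswith p.2 ">>>")) from hcg]

theorem pv_ends_zero (ls : List String) : pvEnds 0 ls = pvSIdx ls := by
  unfold pvEnds pvSIdx
  congr 1
  apply List.filter_congr
  intro p hp
  obtain ⟨k, _, rfl⟩ := (PySem.List.mem_enumerate_iff ls 0 p).1 hp
  have : decide ((0 : Int) ≤ ((0 : Int) + (k : Int), ls[k]).1) = true := by
    rw [decide_eq_true_iff]; omega
  rw [this, Bool.true_and]

-- one unfolding step of A's loop, with the two flag updates resolved
theorem pv_aloop_false_cons (l : String) (ls : List String) :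
    pvAloop false (l :: ls) =
      if PySem.Str.endswith l "pulled in by:" then
        (if PySem.Str.startswith l ">>>" then [] else l :: pvAloop true ls)
      else l :: pvAloop false ls := by
  by_cases hE : PySem.Str.endswith l "pulled in by:" <;>
    by_cases hS : PySem.Str.startswith l ">>>" <;>
      simp only [pvAloop, hE, hS, Bool.false_eq_true, if_true, if_false]

theorem pv_aloop_true_cons (l : String) (ls : List String) :
    pvAloop true (l :: ls) =
      if PySem.Str.startswith l ">>>" then [] else l :: pvAloop true ls := by
  by_cases hS : PySem.Str.startswith l ">>>" <;>
    simp only [pvAloop, hS, Bool.false_eq_true, if_true, if_false]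

-- A's loop after the start token has been seen computes B's slice up to the first end index
theorem pv_aloop_true (ls : List String) :
    pvAloop true ls = PySem.List.slice ls none (some ((pvSIdx ls).headD (ls.length : Int))) := by
  induction ls with
  | nil => rw [show pvSIdx [] = [] from rfl]; simp [pvAloop, pv_slice_zero]
  | cons l ls ih =>
    rw [pv_aloop_true_cons, pv_sidx_cons]
    by_cases hS : PySem.Str.startswith l ">>>"
    · rw [if_pos hS, if_pos hS]
      simp only [List.cons_append, List.headD_cons]
      rw [pv_slice_zero]
    · rw [if_neg hS, if_neg hS, List.nil_append]
      have hhd : (((if PySem.Str.startswith l ">>>" then [(0:Int)] else []) ++ (pvSIdx ls).map (· + 1)).headD ((l :: ls).length : Int))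
          = (pvSIdx ls).headD (ls.length : Int) + 1 := by
        rw [if_neg hS, List.nil_append,
          show ((l :: ls).length : Int) = (ls.length : Int) + 1 by push_cast [List.length_cons]; ring]
        exact pv_headD_map_add_one _ _
      rw [if_neg hS, List.nil_append] at hhd
      rw [hhd, pv_slice_cons _ _ _ (pv_headD_nonneg _ _ (pv_sidx_nonneg ls) (by positivity)), ih]

theorem pv_main (ls : List String) : pvAloop false ls = filter_input_lines_py_alt ls := by
  induction ls with
  | nil => rfl
  | cons l ls ih =>
    rw [pv_aloop_false_cons, pv_alt_def, pv_starts_cons]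
    by_cases hE : PySem.Str.endswith l "pulled in by:"
    · rw [if_pos hE, if_pos hE, List.cons_append, List.nil_append]
      by_cases hS : PySem.Str.startswith l ">>>"
      · rw [if_pos hS]
        have hends : pvEnds 0 (l :: ls) = 0 :: (pvSIdx ls).map (· + 1) := by
          rw [pv_ends_zero (l :: ls), pv_sidx_cons, if_pos hS, List.cons_append, List.nil_append]
        show ([] : List String) = PySem.List.slice (l :: ls) none (some ((pvEnds 0 (l :: ls)).headD (((l :: ls).length : Int))))
        rw [hends]
        simp only [List.headD_cons]
        rw [pv_slice_zero]
      · rw [if_neg hS]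
        have hends : pvEnds 0 (l :: ls) = (pvSIdx ls).map (· + 1) := by
          rw [pv_ends_zero (l :: ls), pv_sidx_cons, if_neg hS, List.nil_append]
        have hhd : (pvEnds 0 (l :: ls)).headD ((l :: ls).length : Int)
            = (pvSIdx ls).headD (ls.length : Int) + 1 := by
          rw [hends, show ((l :: ls).length : Int) = (ls.length : Int) + 1 by push_cast [List.length_cons]; ring]
          exact pv_headD_map_add_one _ _
        show l :: pvAloop true ls = PySem.List.slice (l :: ls) none (some ((pvEnds 0 (l :: ls)).headD (((l :: ls).length : Int))))
        rw [hhd, pv_slice_cons _ _ _ (pv_headD_nonneg _ _ (pv_sidx_nonneg ls) (by positivity)), pv_aloop_true]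
    · rw [if_neg hE, if_neg hE, List.nil_append, ih, pv_alt_def]
      cases hst : pvStarts ls with
      | nil => rfl
      | cons i rest =>
        have hi : 0 ≤ i := pv_starts_nonneg ls i (by rw [hst]; simp)
        rw [List.map_cons]
        show l :: PySem.List.slice ls none (some ((pvEnds i ls).headD ((ls.length : Int)))) = PySem.List.slice (l :: ls) none (some ((pvEnds (i + 1) (l :: ls)).headD (((l :: ls).length : Int))))
        have hhd : (pvEnds (i + 1) (l :: ls)).headD ((l :: ls).length : Int)
            = (pvEnds i ls).headD (ls.length : Int) + 1 := by
          rw [pv_ends_cons i hi l ls,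
            show ((l :: ls).length : Int) = (ls.length : Int) + 1 by push_cast [List.length_cons]; ring]
          exact pv_headD_map_add_one _ _
        rw [hhd, pv_slice_cons _ _ _ (pv_headD_nonneg _ _ (pv_ends_nonneg i ls) (by positivity))]

-- ===== VERDICT (by name: the statement is the Claim_ definition above) =====
theorem filter_input_lines_py_spec : Claim_equal_filter_input_lines_py := by
  intro input_lines _
  unfold Spec_filter_input_lines_py filter_input_lines_py
  exact pv_main input_lines
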